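-- pv_equiv track=rewrite | github.com/larsgeorge/fakeroo | fakeroo.py | convert_tuple_to_str
-- ===== SOURCE A (Python) =====
-- import functools
--
-- def convert_tuple_to_str(data: tuple, delim=',', trim=True) -> str:
--     """Converts tuples containing arbitrary types (not just str) into a string"""
--     def stradd(x1, x2):
--         if not x2:
--             x2 = ""
--         elif type(x2) == tuple:
--             x2 = convert_tuple_to_str(x2, delim=", ")
--         else:
--             x2 = str(x2)
--         if trim:
--             x2 = x2.strip()
--         if not x1:
--             return str(x2)
--         else:
--             return str(x1) + delim + str(x2)
--     return functools.reduce(stradd, data, None)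
-- ===== SOURCE B (Python) =====
-- def convert_tuple_to_str(data: tuple, delim=',', trim=True) -> str:
--     """Converts tuples containing arbitrary types (not just str) into a string"""
--     def proc(x):
--         if not x:
--             s = ""
--         elif type(x) == tuple:
--             s = convert_tuple_to_str(x, delim=", ")
--         else:
--             s = str(x)
--         return s.strip() if trim else s
--     parts = [proc(x) for x in data]
--     while parts and parts[0] == "":
--         parts.pop(0)
--     return delim.join(parts)
-- ===== Notes on version B (the rewrite author's own statement) =====
-- stated objective: simpler
-- what changed: Replaces the stateful functools.reduce accumulator (None sentinel, falsy-accumulator restarts) with a plain decomposition: map every element to its processed string, drop the leading run of empty parts, and delim.join the rest.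
-- outside the precondition, e.g. on convert_tuple_to_str((), ',', True): A returns None, B returns ''
import Mathlib
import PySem

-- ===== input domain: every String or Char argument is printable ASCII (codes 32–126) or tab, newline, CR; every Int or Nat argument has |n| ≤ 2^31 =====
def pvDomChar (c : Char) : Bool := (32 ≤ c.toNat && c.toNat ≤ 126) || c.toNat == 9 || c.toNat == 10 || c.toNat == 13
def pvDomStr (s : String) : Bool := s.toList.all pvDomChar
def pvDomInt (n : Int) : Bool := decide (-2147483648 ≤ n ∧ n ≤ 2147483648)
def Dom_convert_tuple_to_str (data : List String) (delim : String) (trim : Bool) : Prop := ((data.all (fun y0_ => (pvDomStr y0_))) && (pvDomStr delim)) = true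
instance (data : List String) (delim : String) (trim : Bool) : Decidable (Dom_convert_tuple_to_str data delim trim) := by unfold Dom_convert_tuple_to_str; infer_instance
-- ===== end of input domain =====

-- ===== PORT A =====
-- B replaces A's stateful functools.reduce accumulator with build-parts, drop the
-- empty prefix, then delim.join (objective: simpler decomposition, same cost).
-- stradd: the reduce step of A (x1 = accumulator, None at the start).
def straddA (delim : String) (trim : Bool) (x1 : Option String) (x2 : String) : String :=
  let x2a : String := if x2 = "" then "" else x2          -- `if not x2: x2 = ""` / `else: str(x2)` (identity on str)
  let x2b : String := if trim then PySem.Str.strip x2a else x2a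
  match x1 with
  | none => x2b                                           -- `if not x1: return str(x2)` (x1 is None)
  | some s => if s = "" then x2b else s ++ delim ++ x2b   -- `if not x1` (x1 == "") / `str(x1) + delim + str(x2)`

-- functools.reduce(stradd, data, None); on empty data Python returns None (no String),
-- excluded by Pre_ below, so `.getD ""` only totalises the extraction.
def convert_tuple_to_str (data : List String) (delim : String) (trim : Bool) : String :=
  (data.foldl (fun acc x => some (straddA delim trim acc x)) (none : Option String)).getD ""

-- ===== PORT B =====
-- proc(x) of Source B (on strings the tuple/str branches are the identity).
def procB (trim : Bool) (x : String) : String :=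
  let s : String := if x = "" then "" else x
  if trim then PySem.Str.strip s else s

def convert_tuple_to_str_alt (data : List String) (delim : String) (trim : Bool) : String :=
  let parts := data.map (procB trim)
  PySem.Str.join delim (parts.dropWhile (fun p => p == ""))  -- while parts and parts[0]=="": pop(0); delim.join(parts)

-- ===== PRECONDITION & SPEC =====
-- Pre_ excludes only the empty tuple: there A returns None (reduce's initial value),
-- not a str; B naturally returns "".
def Pre_convert_tuple_to_str (data : List String) (delim : String) (trim : Bool) : Prop :=
  data ≠ []
instance (data : List String) (delim : String) (trim : Bool) : Decidable (Pre_convert_tuple_to_str data delim trim) := by unfold Pre_convert_tuple_to_str; infer_instance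

def pvWitness_convert_tuple_to_str : List String × String × Bool := (["", " a ", "b"], ",", true)

def Spec_convert_tuple_to_str (data : List String) (delim : String) (trim : Bool) (out : String) : Prop := out = convert_tuple_to_str_alt data delim trim
instance (data : List String) (delim : String) (trim : Bool) (out : String) : Decidable (Spec_convert_tuple_to_str data delim trim out) := by unfold Spec_convert_tuple_to_str; infer_instance

-- ===== CLAIM (what is proved, stated in full; the proofs are below) =====
def Claim_equal_convert_tuple_to_str : Prop := ∀ (data : List String) (delim : String) (trim : Bool), Dom_convert_tuple_to_str data delim trim → Pre_convert_tuple_to_str data delim trim → Spec_convert_tuple_to_str data delim trim (convert_tuple_to_str data delim trim)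

-- ===== LEMMAS AND PROOFS =====

-- the combining step on already-processed parts
def combP (delim a p : String) : String := if a = "" then p else a ++ delim ++ p

theorem straddA_some (delim : String) (trim : Bool) (s x : String) :
    straddA delim trim (some s) x = combP delim s (procB trim x) := by
  simp [straddA, procB, combP]

theorem straddA_none (delim : String) (trim : Bool) (x : String) :
    straddA delim trim none x = procB trim x := by
  simp [straddA, procB]

@[simp] theorem join_nil_str (d : String) : PySem.Str.join d [] = "" := by
  simp [PySem.Str.join]

@[simp] theorem join_singleton_str (d s : String) : PySem.Str.join d [s] = s := by
  simp [PySem.Str.join]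

theorem join_cons_cons_str (d a b : String) (l : List String) :
    PySem.Str.join d (a::b::l) = a ++ d ++ PySem.Str.join d (b::l) := by
  simp [PySem.Str.join, PySem.Chars.join_cons_cons, String.append_assoc]

theorem append3_ne_empty (s d p : String) (h : s ≠ "") : s ++ d ++ p ≠ "" := by
  intro hc
  have := congrArg String.toList hc
  simp at this
  exact h this.1

-- Once the A-side accumulator is a string, the reduce folds combP over processed parts.
theorem foldA_some (delim : String) (trim : Bool) (xs : List String) (s : String) :
    xs.foldl (fun acc x => some (straddA delim trim acc x)) (some s) =
      some ((xs.map (procB trim)).foldl (combP delim) s) := by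
  induction xs generalizing s with
  | nil => rfl
  | cons x xs ih => simp [List.foldl_cons, straddA_some, ih]

-- Folding combP from a non-empty seed is join of seed-then-parts.
theorem foldl_combP_ne (delim : String) (ps : List String) (s : String) (h : s ≠ "") :
    ps.foldl (combP delim) s = PySem.Str.join delim (s :: ps) := by
  induction ps generalizing s with
  | nil => simp
  | cons p ps ih =>
    rw [List.foldl_cons, join_cons_cons_str]
    have hne : combP delim s p = s ++ delim ++ p := by simp [combP, h]
    rw [hne, ih _ (append3_ne_empty s delim p h)]
    cases ps with
    | nil => simp
    | cons q qs => simp [join_cons_cons_str, String.append_assoc]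

-- Folding combP from "" skips the empty prefix and joins the rest.
theorem foldl_combP_empty (delim : String) (ps : List String) :
    ps.foldl (combP delim) "" = PySem.Str.join delim (ps.dropWhile (fun p => p == "")) := by
  induction ps with
  | nil => simp
  | cons p ps ih =>
    by_cases h : p = ""
    · subst h
      simpa [List.foldl_cons, combP] using ih
    · rw [List.foldl_cons]
      have : combP delim "" p = p := by simp [combP]
      rw [this, foldl_combP_ne delim ps p h, List.dropWhile_cons]
      simp [h]

-- ===== VERDICT (by name: the statement is the Claim_ definition above) =====
theorem convert_tuple_to_str_spec : Claim_equal_convert_tuple_to_str := by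
  intro data delim trim _ hpre
  unfold Spec_convert_tuple_to_str convert_tuple_to_str convert_tuple_to_str_alt
  cases data with
  | nil => exact absurd rfl hpre
  | cons x xs =>
    rw [List.foldl_cons, straddA_none, foldA_some, Option.getD_some]
    have hstart : (xs.map (procB trim)).foldl (combP delim) (procB trim x) =
        ((x :: xs).map (procB trim)).foldl (combP delim) "" := by
      simp [List.foldl_cons, combP]
    rw [hstart, foldl_combP_empty]
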